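-- pv_equiv track=rewrite | github.com/diffix/coronaVirus | contact-tracing-demo/src/prox/statistic.py | _peopleAndStayCounts
-- ===== SOURCE A (Python) =====
-- def _peopleAndStayCounts(visits):
--     numStays = dict()
--     for visitLst in visits.values():
--         for visit in visitLst:
--             if visit[0] not in numStays:
--                 numStays[visit[0]] = 0
--             numStays[visit[0]] += 1
--     numCounts = dict()
--     for count in numStays.values():
--         if count not in numCounts:
--             numCounts[count] = 0
--         numCounts[count] += 1
--     return list(numStays.keys()), sorted([(c, v) for c, v in numCounts.items()], key=lambda item: item[0])
-- ===== SOURCE B (Python) =====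
-- def _peopleAndStayCounts(visits):
--     names = [visit[0] for visitLst in visits.values() for visit in visitLst]
--     people = list(dict.fromkeys(names))
--     stays = sorted(names.count(p) for p in people)
--     dist = []
--     for c in stays:
--         if dist and dist[-1][0] == c:
--             dist[-1] = (c, dist[-1][1] + 1)
--         else:
--             dist.append((c, 1))
--     return people, dist
-- ===== Notes on version B (the rewrite author's own statement) =====
-- stated objective: alternative
-- what changed: B has no counting dicts at all: people come from an ordered dedup (dict.fromkeys) of the flattened name list with per-person totals obtained by names.count, and the distribution is produced by run-length encoding the sorted counts list instead of hash-counting into a frequency dict and then sorting its items.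
import Mathlib
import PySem

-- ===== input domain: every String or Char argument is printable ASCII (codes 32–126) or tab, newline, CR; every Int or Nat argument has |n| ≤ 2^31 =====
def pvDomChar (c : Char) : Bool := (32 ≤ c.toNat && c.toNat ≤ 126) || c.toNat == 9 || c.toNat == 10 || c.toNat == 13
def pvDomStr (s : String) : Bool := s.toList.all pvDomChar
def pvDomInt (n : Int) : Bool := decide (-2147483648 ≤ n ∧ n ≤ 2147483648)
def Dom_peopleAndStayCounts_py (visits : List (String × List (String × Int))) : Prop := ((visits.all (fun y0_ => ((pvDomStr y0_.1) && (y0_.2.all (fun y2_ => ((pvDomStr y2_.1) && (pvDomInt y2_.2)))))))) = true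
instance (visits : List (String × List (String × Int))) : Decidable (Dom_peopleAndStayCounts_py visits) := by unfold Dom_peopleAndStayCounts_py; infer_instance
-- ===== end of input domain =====

-- B removes both counting dicts: people via ordered dedup (dict.fromkeys) of the flattened
-- name list with per-person totals via names.count, and the distribution via run-length
-- encoding of the sorted counts list (objective: alternative).


-- ===== PORT A =====
def peopleAndStayCounts_py (visits : List (String × List (String × Int))) : List String × (List (Int × Int)) :=
  let numStays : PySem.Dict String Int :=
    visits.foldl (fun d visitLst =>
      visitLst.2.foldl (fun d visit =>
        let d := if d.contains visit.1 then d else d.insert visit.1 0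
        d.insert visit.1 (d.getD visit.1 0 + 1)) d) PySem.Dict.empty
  let numCounts : PySem.Dict Int Int :=
    numStays.values.foldl (fun d count =>
      let d := if d.contains count then d else d.insert count 0
      d.insert count (d.getD count 0 + 1)) PySem.Dict.empty
  (numStays.keys,
   PySem.List.sorted (numCounts.items.map (fun p => (p.1, p.2))) (fun item => item.1) false)

-- ===== PORT B =====
def peopleAndStayCounts_py_alt (visits : List (String × List (String × Int))) : List String × (List (Int × Int)) :=
  let names : List String := visits.flatMap (fun visitLst => visitLst.2.map (fun visit => visit.1))
  let people : List String := PySem.List.dedup names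
  let stays : List Int :=
    PySem.List.sorted (people.map (fun p => (PySem.List.count names p : Int))) (fun c => c) false
  let dist : List (Int × Int) :=
    stays.foldl (fun dist c =>
      match dist.getLast? with
      | some last => if last.1 = c then dist.dropLast ++ [(c, last.2 + 1)] else dist ++ [(c, 1)]
      | none => dist ++ [(c, 1)]) []
  (people, dist)

-- ===== PRECONDITION & SPEC =====
-- Pre_ excludes association lists with duplicate top-level keys: they do not represent a
-- Python dict (dict construction collapses duplicates), so no port can be faithful there.
def Pre_peopleAndStayCounts_py (visits : List (String × List (String × Int))) : Prop :=
  (visits.map (fun p => p.1)).Nodup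
instance (visits : List (String × List (String × Int))) : Decidable (Pre_peopleAndStayCounts_py visits) := by unfold Pre_peopleAndStayCounts_py; infer_instance
def pvWitness_peopleAndStayCounts_py : (List (String × List (String × Int))) :=
  [("a", [("x", 1), ("y", 2)]), ("b", [("x", 3)])]
def Spec_peopleAndStayCounts_py (visits : List (String × List (String × Int))) (out : List String × (List (Int × Int))) : Prop := out = peopleAndStayCounts_py_alt visits
instance (visits : List (String × List (String × Int))) (out : List String × (List (Int × Int))) : Decidable (Spec_peopleAndStayCounts_py visits out) := by unfold Spec_peopleAndStayCounts_py; infer_instance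

-- ===== CLAIM (what is proved, stated in full; the proofs are below) =====
def Claim_equal_peopleAndStayCounts_py : Prop := ∀ (visits : List (String × List (String × Int))), Dom_peopleAndStayCounts_py visits → Pre_peopleAndStayCounts_py visits → Spec_peopleAndStayCounts_py visits (peopleAndStayCounts_py visits)

-- ===== LEMMAS AND PROOFS =====

-- B's run-length step (the body of B's foldl, named for the proofs).
def rleStep (dist : List (Int × Int)) (c : Int) : List (Int × Int) :=
  match dist.getLast? with
  | some last => if last.1 = c then dist.dropLast ++ [(c, last.2 + 1)] else dist ++ [(c, 1)]
  | none => dist ++ [(c, 1)]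

-- A's "if absent insert 0, then d[k] += 1" step equals the single getD-based insert step.
theorem stepA_eq_step {κ : Type} [BEq κ] [LawfulBEq κ] (d : PySem.Dict κ Int) (k : κ) :
    (let d1 := if d.contains k then d else d.insert k 0
     d1.insert k (d1.getD k 0 + 1)) = d.insert k (d.getD k 0 + 1) := by
  by_cases h : d.contains k
  · simp [h]
  · simp only [h, Bool.false_eq_true, if_false]
    rw [PySem.Dict.getD_insert_self, PySem.Dict.insert_insert_self,
        PySem.Dict.getD_of_not_contains _ _ (by simpa using h)]

-- Folding A's step equals folding the getD-based step.
theorem foldl_stepA_eq {κ α : Type} [BEq κ] [LawfulBEq κ] (l : List α) (key : α → κ)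
    (d : PySem.Dict κ Int) :
    l.foldl (fun d x =>
      let d1 := if d.contains (key x) then d else d.insert (key x) 0
      d1.insert (key x) (d1.getD (key x) 0 + 1)) d
    = l.foldl (fun d x => d.insert (key x) (d.getD (key x) 0 + 1)) d :=
  PySem.List.foldl_congr_mem l _ _ d (fun acc x _ => stepA_eq_step acc (key x))

-- A's nested phase-1 fold equals Counter of the flattened name list.
theorem phase1_eq_counter (visits : List (String × List (String × Int))) :
    visits.foldl (fun d visitLst =>
      visitLst.2.foldl (fun d visit =>
        let d := if d.contains visit.1 then d else d.insert visit.1 0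
        d.insert visit.1 (d.getD visit.1 0 + 1)) d) PySem.Dict.empty
    = PySem.Dict.counter (visits.flatMap (fun visitLst => visitLst.2.map (fun visit => visit.1))) := by
  rw [← PySem.Dict.foldl_insert_getD_add_one_eq_counter]
  have h : ∀ (vs : List (String × List (String × Int))) (d : PySem.Dict String Int),
      vs.foldl (fun d visitLst =>
        visitLst.2.foldl (fun d visit =>
          let d := if d.contains visit.1 then d else d.insert visit.1 0
          d.insert visit.1 (d.getD visit.1 0 + 1)) d) d
      = (vs.flatMap (fun visitLst => visitLst.2.map (fun visit => visit.1))).foldl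
          (fun d name => d.insert name (d.getD name 0 + 1)) d := by
    intro vs
    induction vs with
    | nil => intro d; rfl
    | cons p rest ih =>
        intro d
        simp only [List.foldl_cons, List.flatMap_cons, List.foldl_append, List.foldl_map]
        rw [ih, foldl_stepA_eq p.2 (fun v => v.1) d]
  exact h visits _

-- A's phase-2 fold (from empty) is the counter of the values list.
theorem foldl_phase2 (vs : List Int) :
    vs.foldl (fun d count =>
      let d := if d.contains count then d else d.insert count 0
      d.insert count (d.getD count 0 + 1)) PySem.Dict.empty = PySem.Dict.counter vs := by
  rw [← PySem.Dict.foldl_insert_getD_add_one_eq_counter]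
  exact foldl_stepA_eq vs (fun c => c) _

-- dedup keeps a subsequence of the original list.
theorem dedup_sublist {α : Type} [BEq α] [LawfulBEq α] (p : List α) :
    (PySem.List.dedup p).Sublist p := by
  induction p using List.reverseRecOn with
  | nil => simp
  | append_singleton q x ih =>
      have h : PySem.List.dedup (q ++ [x]) = PySem.Set.add (PySem.List.dedup q) x := by
        simp [PySem.List.dedup_eq_ofList, PySem.Set.ofList_eq_foldl, List.foldl_append, PySem.Set.add]
      rw [h]; unfold PySem.Set.add
      split
      · exact ih.trans (List.sublist_append_left q [x])
      · exact List.Sublist.append ih (List.Sublist.refl [x])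

-- the last element of a ≤-sorted nodup list that contains an upper bound c is c itself.
theorem getLast?_of_max (l : List Int) (c : Int) (hs : l.Pairwise (· ≤ ·)) (hn : l.Nodup)
    (hc : c ∈ l) (hub : ∀ x ∈ l, x ≤ c) : l.getLast? = some c := by
  induction l with
  | nil => cases hc
  | cons a t ih =>
      cases t with
      | nil => simp at hc ⊢; exact hc.symm
      | cons b t' =>
          have ha : ∀ x ∈ b :: t', a ≤ x := fun x hx => (List.pairwise_cons.mp hs).1 x hx
          have hct : c ∈ b :: t' := by
            rcases List.mem_cons.mp hc with h | h
            · subst h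
              have : b = c := le_antisymm (hub b (by simp)) (ha b (by simp))
              simp [this]
            · exact h
          have := ih (List.pairwise_cons.mp hs).2 (List.nodup_cons.mp hn).2 hct
            (fun x hx => hub x (List.mem_cons_of_mem _ hx))
          simpa [List.getLast?_cons_cons] using this

-- one RLE step on the encoding of a prefix p, fed the next element c of a sorted list.
theorem rle_step_lemma (p : List Int) (c : Int) (hp : p.Pairwise (· ≤ ·)) (hub : ∀ x ∈ p, x ≤ c) :
    rleStep ((PySem.List.dedup p).map (fun k => (k, (p.count k : Int)))) c
    = (PySem.List.dedup (p ++ [c])).map (fun k => (k, ((p ++ [c]).count k : Int))) := by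
  have hded : PySem.List.dedup (p ++ [c]) = PySem.Set.add (PySem.List.dedup p) c := by
    simp [PySem.List.dedup_eq_ofList, PySem.Set.ofList_eq_foldl, List.foldl_append, PySem.Set.add]
  have hnd : (PySem.List.dedup p).Nodup := PySem.List.nodup_dedup p
  have hsub := dedup_sublist p
  by_cases hc : c ∈ p
  · -- c already seen: dedup unchanged, the last run is extended
    have hcd : c ∈ PySem.List.dedup p := (PySem.List.mem_dedup _ _).mpr hc
    have hded' : PySem.List.dedup (p ++ [c]) = PySem.List.dedup p := by
      rw [hded]; unfold PySem.Set.add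
      simp [hc]
    have hlast : (PySem.List.dedup p).getLast? = some c :=
      getLast?_of_max _ c (hp.sublist hsub) hnd hcd (fun x hx => hub x (hsub.mem hx))
    have hsplit : PySem.List.dedup p = (PySem.List.dedup p).dropLast ++ [c] :=
      (List.dropLast_append_getLast? c hlast).symm
    set q := (PySem.List.dedup p).dropLast with hq
    have hqnd : (q ++ [c]).Nodup := by rw [← hsplit]; exact hnd
    have hqc : ∀ k ∈ q, ¬ k = c := by
      intro k hk he; subst he
      exact (List.disjoint_of_nodup_append hqnd) hk (by simp)
    rw [hded', hsplit, List.map_append, List.map_append]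
    simp only [List.map_cons, List.map_nil]
    rw [rleStep]
    simp only [List.getLast?_concat, List.dropLast_concat, if_pos]
    congr 1
    · apply List.map_congr_left
      intro k hk
      simp [List.count_append, Ne.symm (hqc k hk)]
    · simp [List.count_append]
  · -- c not seen: dedup grows by c, a new run (c, 1) is appended
    have hded' : PySem.List.dedup (p ++ [c]) = PySem.List.dedup p ++ [c] := by
      rw [hded]; unfold PySem.Set.add
      simp [hc]
    have hmapeq : (PySem.List.dedup p).map (fun k => ((k, ((p ++ [c]).count k : Int)) : Int × Int))
        = (PySem.List.dedup p).map (fun k => (k, (p.count k : Int))) := by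
      apply List.map_congr_left
      intro k hk
      have hkc' : ¬ k = c := by
        intro he; exact hc (he ▸ (PySem.List.mem_dedup _ _).mp hk)
      simp [List.count_append, Ne.symm hkc']
    have hcnt : ((p ++ [c]).count c : Int) = 1 := by
      have h0 : p.count c = 0 := List.count_eq_zero.mpr hc
      simp [List.count_append, h0]
    rw [hded', List.map_append, hmapeq]
    simp only [List.map_cons, List.map_nil, hcnt]
    rcases List.eq_nil_or_concat (PySem.List.dedup p) with hdp | ⟨q, m, hdp⟩
    · rw [hdp]; rfl
    · rw [List.concat_eq_append] at hdp
      have hm : m ∈ PySem.List.dedup p := by rw [hdp]; simp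
      have hmc : ¬ m = c := fun he => hc (he ▸ (PySem.List.mem_dedup _ _).mp hm)
      rw [hdp, List.map_append]
      simp only [List.map_cons, List.map_nil]
      rw [rleStep]
      simp [hmc]

-- RLE invariant: folding rleStep over the rest of a sorted list, starting from the
-- encoding of the prefix, yields the encoding of the whole list.
theorem rle_invariant (rest : List Int) : ∀ (p : List Int), (p ++ rest).Pairwise (· ≤ ·) →
    rest.foldl rleStep ((PySem.List.dedup p).map (fun k => (k, (p.count k : Int))))
    = (PySem.List.dedup (p ++ rest)).map (fun k => (k, ((p ++ rest).count k : Int))) := by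
  induction rest with
  | nil => intro p _; simp
  | cons c rest' ih =>
      intro p hs
      have hp : p.Pairwise (· ≤ ·) := (List.pairwise_append.mp hs).1
      have hub : ∀ x ∈ p, x ≤ c :=
        fun x hx => (List.pairwise_append.mp hs).2.2 x hx c (by simp)
      have hassoc : p ++ c :: rest' = (p ++ [c]) ++ rest' := by simp
      rw [List.foldl_cons, rle_step_lemma p c hp hub, hassoc]
      exact ih (p ++ [c]) (by rw [← hassoc]; exact hs)

-- the sorted distinct values equal the ordered dedup of the sorted values.
theorem sorted_ofList_eq_dedup_sorted (vs : List Int) :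
    PySem.List.sorted (PySem.Set.ofList vs) (fun c => c) false
    = PySem.List.dedup (PySem.List.sorted vs (fun c => c) false) := by
  apply PySem.List.sorted_eq_of_perm_of_pairwise_lt
  · rw [List.perm_ext_iff_of_nodup (PySem.List.nodup_dedup _) (PySem.Set.nodup_ofList _)]
    intro a
    rw [PySem.List.mem_dedup, PySem.List.mem_sorted, PySem.Set.mem_ofList]
  · have hle : (PySem.List.dedup (PySem.List.sorted vs (fun c => c) false)).Pairwise (· ≤ ·) :=
      (PySem.List.sorted_pairwise (xs := vs) (key := fun c => c)).sublist (dedup_sublist _)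
    have hne := PySem.List.nodup_dedup (PySem.List.sorted vs (fun c => c) false)
    rw [List.Nodup] at hne
    exact (hle.and hne).imp (fun h => lt_of_le_of_ne h.1 h.2)

-- sorting Counter(vs).items() by key equals the RLE of the sorted values list.
theorem sorted_counter_eq_rle (vs : List Int) :
    PySem.List.sorted ((PySem.Dict.counter vs).items.map (fun p => (p.1, p.2))) (fun item => item.1) false
    = (PySem.List.sorted vs (fun c => c) false).foldl rleStep [] := by
  have hrle : (PySem.List.sorted vs (fun c => c) false).foldl rleStep []
      = (PySem.List.dedup (PySem.List.sorted vs (fun c => c) false)).map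
          (fun k => (k, ((PySem.List.sorted vs (fun c => c) false).count k : Int))) := by
    have h := rle_invariant (PySem.List.sorted vs (fun c => c) false) []
      (by simpa using PySem.List.sorted_pairwise (xs := vs) (key := fun c => c))
    simpa using h
  have hcount : ∀ k : Int, (PySem.List.sorted vs (fun c => c) false).count k = vs.count k :=
    fun k => (PySem.List.sorted_perm vs (fun c => c) false).count_eq k
  have hform : (PySem.List.sorted vs (fun c => c) false).foldl rleStep []
      = (PySem.List.sorted (PySem.Set.ofList vs) (fun c => c) false).map
          (fun k => (k, (vs.count k : Int))) := by
    rw [hrle, ← sorted_ofList_eq_dedup_sorted]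
    simp only [hcount]
  rw [PySem.Dict.items_counter, hform]
  simp only [Prod.mk.eta, List.map_id']
  apply PySem.List.sorted_eq_of_perm_of_pairwise_lt
  · exact List.Perm.map _ (PySem.List.sorted_perm _ _ _)
  · exact List.Pairwise.map _ (by intro a b hab; simpa using hab)
      (PySem.List.sorted_ofList_pairwise_lt (xs := vs))

-- Counter(names).values() lists, per first occurrence, each name's total count.
theorem values_counter_eq (names : List String) :
    (PySem.Dict.counter names).values
    = (PySem.List.dedup names).map (fun p => (PySem.List.count names p : Int)) := by
  simp only [PySem.Dict.values, PySem.Dict.items_counter, List.map_map]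
  simp only [PySem.List.dedup_eq_ofList, PySem.List.count_eq, Function.comp_def]

-- ===== VERDICT (by name: the statement is the Claim_ definition above) =====
theorem peopleAndStayCounts_py_spec : Claim_equal_peopleAndStayCounts_py := by
  intro visits _ _
  unfold Spec_peopleAndStayCounts_py peopleAndStayCounts_py peopleAndStayCounts_py_alt
  simp only [phase1_eq_counter, foldl_phase2, values_counter_eq, PySem.Dict.keys_counter,
    sorted_counter_eq_rle]
  simp only [PySem.List.dedup_eq_ofList]
  rfl
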